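-- pv_equiv track=rewrite | github.com/erlint1212/ai-transealtion-novel-to-anki-tts | utils.py | get_relevant_glossary
-- ===== SOURCE A (Python) =====
-- def get_relevant_glossary(text: str, master_glossary: dict) -> dict:
--     """
--     Scans the master glossary and returns a mini-glossary
--     containing only the entities found in the current text chunk.
--     Supports: characters, places, items, skills.
--     """
--     relevant = {
--         "characters": {},
--         "places": {},
--         "items": {},
--         "skills": {}
--     }
--
--     # Iterate through all 4 categories
--     categories = ["characters", "places", "items", "skills"]
--
--     for category in categories:
--         # Check if the category exists in the master file (backward compatibility)
--         if category in master_glossary: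
--             for cn_name, data in master_glossary[category].items():
--                 if cn_name in text:
--                     relevant[category][cn_name] = data
--
--     return relevant
-- ===== SOURCE B (Python) =====
-- def _name_lengths(master_glossary, categories):
--     """Distinct lengths of the glossary names across the categories."""
--     lengths = set()
--     for category in categories:
--         for name in master_glossary.get(category, {}):
--             lengths.add(len(name))
--     return lengths
--
--
-- def _window_substrings(text, lengths):
--     """All substrings of text whose length is one of the given lengths."""
--     subs = set()
--     n = len(text)
--     for length in lengths:
--         for i in range(n - length + 1):
--             subs.add(text[i:i + length])
--     return subs
--
--
-- def _filter_names(subs, entries):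
--     """Keep the entries whose name occurs in the substring set."""
--     kept = {}
--     for name, data in entries.items():
--         if name in subs:
--             kept[name] = data
--     return kept
--
--
-- def get_relevant_glossary(text: str, master_glossary: dict) -> dict:
--     """Slide a window of each distinct name length over the text once,
--     collecting the candidate substrings into a hash set; each glossary
--     name is then checked by a single set lookup."""
--     categories = ["characters", "places", "items", "skills"]
--     subs = _window_substrings(text, _name_lengths(master_glossary, categories))
--     result = {}
--     for category in categories:
--         result[category] = _filter_names(subs, master_glossary.get(category, {}))
--     return result
-- ===== Notes on version B (the rewrite author's own statement) =====
-- stated objective: alternative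
-- what changed: Instead of running a full substring search over the text for every glossary name, B groups the names by length, slides a window of each distinct name length over the text once collecting the substrings seen into a hash set, and then checks each name by a single set lookup.
import Mathlib
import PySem

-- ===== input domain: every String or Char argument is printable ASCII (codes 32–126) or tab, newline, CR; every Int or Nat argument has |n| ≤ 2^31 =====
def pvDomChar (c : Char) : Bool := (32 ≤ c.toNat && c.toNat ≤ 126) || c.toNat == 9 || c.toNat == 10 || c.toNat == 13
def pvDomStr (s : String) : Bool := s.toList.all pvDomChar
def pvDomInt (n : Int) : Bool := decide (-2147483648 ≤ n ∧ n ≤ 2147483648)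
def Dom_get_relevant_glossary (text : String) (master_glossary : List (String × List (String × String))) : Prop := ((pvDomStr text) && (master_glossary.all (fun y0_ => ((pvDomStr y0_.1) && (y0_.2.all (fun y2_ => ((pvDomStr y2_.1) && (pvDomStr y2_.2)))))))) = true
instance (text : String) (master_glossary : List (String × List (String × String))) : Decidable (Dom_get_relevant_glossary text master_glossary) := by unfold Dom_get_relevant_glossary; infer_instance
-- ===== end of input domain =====

-- B groups the glossary names by length and slides a window of each distinct
-- name length over the text once, collecting the candidate substrings into a
-- hash set, so each name is then checked by a single set lookup (an alternative
-- algorithm; not claimed faster).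


-- ===== PORT A =====
def get_relevant_glossary (text : String) (master_glossary : List (String × List (String × String))) : List (String × List (String × String)) :=
  let master : PySem.Dict String (List (String × String)) := PySem.Dict.mk master_glossary
  let relevant : PySem.Dict String (PySem.Dict String String) :=
    PySem.Dict.mk [("characters", PySem.Dict.mk []), ("places", PySem.Dict.mk []),
                   ("items", PySem.Dict.mk []), ("skills", PySem.Dict.mk [])]
  let categories : List String := ["characters", "places", "items", "skills"]
  let relevant := categories.foldl (fun rel category =>
    if master.contains category then
      (master.getD category []).foldl (fun rel p =>
        if PySem.Str.isIn p.1 text then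
          rel.modify category (PySem.Dict.mk []) (fun d => d.insert p.1 p.2)
        else rel) rel
    else rel) relevant
  relevant.items.map (fun p => (p.1, p.2.items))

-- ===== PORT B =====
-- B-side helpers (the three helper functions of Source B, loop for loop).
def pvNameLengths (master : PySem.Dict String (List (String × String))) (categories : List String) : PySem.Set Int :=
  categories.foldl (fun ls category =>
    (master.getD category []).foldl (fun ls p => ls.add (PySem.Str.len p.1)) ls)
    (PySem.Set.ofList [])

-- Source B iterates the `lengths` set; the resulting `subs` SET does not depend on
-- that iteration order, so iterating in first-insertion order is exact.
def pvWindowSubs (text : String) (lengths : PySem.Set Int) : PySem.Set String :=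
  lengths.foldl (fun subs L =>
    (PySem.List.pyRange 0 (PySem.Str.len text - L + 1)).foldl
      (fun subs i => subs.add (PySem.Str.slice text (some i) (some (i + L)))) subs)
    (PySem.Set.ofList [])

def pvBFilter (subs : PySem.Set String) (entries : List (String × String)) : PySem.Dict String String :=
  entries.foldl (fun kept p =>
    if subs.contains p.1 then kept.insert p.1 p.2 else kept) (PySem.Dict.mk [])

def get_relevant_glossary_alt (text : String) (master_glossary : List (String × List (String × String))) : List (String × List (String × String)) :=
  let master : PySem.Dict String (List (String × String)) := PySem.Dict.mk master_glossary
  let categories : List String := ["characters", "places", "items", "skills"]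
  let subs : PySem.Set String := pvWindowSubs text (pvNameLengths master categories)
  let result : PySem.Dict String (PySem.Dict String String) :=
    categories.foldl (fun res category =>
      res.insert category (pvBFilter subs (master.getD category []))) (PySem.Dict.mk [])
  result.items.map (fun p => (p.1, p.2.items))

-- ===== PRECONDITION & SPEC =====
def Spec_get_relevant_glossary (text : String) (master_glossary : List (String × List (String × String))) (out : List (String × List (String × String))) : Prop := out = get_relevant_glossary_alt text master_glossary
instance (text : String) (master_glossary : List (String × List (String × String))) (out : List (String × List (String × String))) : Decidable (Spec_get_relevant_glossary text master_glossary out) := by unfold Spec_get_relevant_glossary; infer_instance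

-- ===== CLAIM (what is proved, stated in full; the proofs are below) =====
def Claim_equal_get_relevant_glossary : Prop := ∀ (text : String) (master_glossary : List (String × List (String × String))), Dom_get_relevant_glossary text master_glossary → Spec_get_relevant_glossary text master_glossary (get_relevant_glossary text master_glossary)

-- ===== LEMMAS AND PROOFS =====

-- A's inner loop (repeated read-modify of one key) shifts into the key's value.
theorem pv_foldl_modify_shift (text : String) (c : String) (l : List (String × String))
    (rel : PySem.Dict String (PySem.Dict String String)) (v : PySem.Dict String String) :
    l.foldl (fun rel p => if PySem.Str.isIn p.1 text then
        rel.modify c (PySem.Dict.mk []) (fun d => d.insert p.1 p.2) else rel) (rel.insert c v)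
    = rel.insert c (l.foldl (fun d p =>
        if PySem.Str.isIn p.1 text then d.insert p.1 p.2 else d) v) := by
  induction l generalizing v with
  | nil => rfl
  | cons p l ih =>
    simp only [List.foldl_cons]
    by_cases h : PySem.Str.isIn p.1 text
    · simp only [h, if_true, PySem.Dict.modify, PySem.Dict.getD_insert_self,
        PySem.Dict.insert_insert_self]
      exact ih _
    · simp only [h, Bool.false_eq_true, if_false]
      exact ih v

-- One step of A's loop over the four categories, on a dict whose key c is present.
theorem pv_stepA (text : String) (master : PySem.Dict String (List (String × String)))
    (c : String) (rel : PySem.Dict String (PySem.Dict String String))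
    (hrel : rel.insert c (rel.getD c (PySem.Dict.mk [])) = rel) :
    (if master.contains c then
       (master.getD c []).foldl (fun rel p => if PySem.Str.isIn p.1 text then
           rel.modify c (PySem.Dict.mk []) (fun d => d.insert p.1 p.2) else rel) rel
     else rel)
    = rel.insert c ((master.getD c []).foldl (fun d p =>
        if PySem.Str.isIn p.1 text then d.insert p.1 p.2 else d)
        (rel.getD c (PySem.Dict.mk []))) := by
  by_cases h : master.contains c = true
  · rw [if_pos h]
    conv_lhs => rw [← hrel]
    rw [pv_foldl_modify_shift]
  · rw [if_neg h]
    have hget : master.get? c = none := by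
      rw [PySem.Dict.contains_eq_isSome_get?] at h
      exact Option.not_isSome_iff_eq_none.mp (by simp [h])
    have : master.getD c [] = [] := by
      rw [PySem.Dict.getD_eq_get?_getD, hget]
      rfl
    rw [this, List.foldl_nil, hrel]

-- Generic membership in a fold of set-inserts (the shape of both of B's builders).
theorem pv_mem_foldl_add {α β : Type} [BEq α] [LawfulBEq α] (l : List β)
    (F : PySem.Set α → β → PySem.Set α) (Q : β → α → Prop) (y : α)
    (hF : ∀ s x, y ∈ F s x ↔ y ∈ s ∨ Q x y) (s : PySem.Set α) :
    y ∈ l.foldl F s ↔ y ∈ s ∨ ∃ x ∈ l, Q x y := by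
  induction l generalizing s with
  | nil => simp
  | cons x l ih =>
    rw [List.foldl_cons, ih]
    rw [hF s x]
    constructor
    · rintro ((h | h) | ⟨z, hz, hQ⟩)
      · exact Or.inl h
      · exact Or.inr ⟨x, by simp, h⟩
      · exact Or.inr ⟨z, by simp [hz], hQ⟩
    · rintro (h | ⟨z, hz, hQ⟩)
      · exact Or.inl (Or.inl h)
      · rcases List.mem_cons.mp hz with rfl | hz
        · exact Or.inl (Or.inr hQ)
        · exact Or.inr ⟨z, hz, hQ⟩

-- Membership in B's set of name lengths.
theorem pv_mem_lengths (master : PySem.Dict String (List (String × String)))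
    (cats : List String) (L : Int) :
    L ∈ pvNameLengths master cats
    ↔ ∃ c ∈ cats, ∃ p ∈ master.getD c [], L = PySem.Str.len p.1 := by
  unfold pvNameLengths
  rw [pv_mem_foldl_add (Q := fun c L => ∃ p ∈ master.getD c [], L = PySem.Str.len p.1)]
  · rw [PySem.Set.mem_ofList]
    simp
  · intro s c
    rw [pv_mem_foldl_add (Q := fun p L => L = PySem.Str.len p.1)]
    intro s p
    rw [PySem.Set.mem_add]

-- Membership in B's window-substring set.
theorem pv_mem_window (text : String) (lengths : PySem.Set Int) (y : String) :
    y ∈ pvWindowSubs text lengths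
    ↔ ∃ L ∈ lengths, ∃ i, (0 ≤ i ∧ i < PySem.Str.len text - L + 1) ∧
        PySem.Str.slice text (some i) (some (i + L)) = y := by
  unfold pvWindowSubs
  rw [pv_mem_foldl_add (Q := fun L y => ∃ i, (0 ≤ i ∧ i < PySem.Str.len text - L + 1) ∧ PySem.Str.slice text (some i) (some (i + L)) = y)]
  · rw [PySem.Set.mem_ofList]
    simp
  · intro s L
    rw [pv_mem_foldl_add (Q := fun i y => PySem.Str.slice text (some i) (some (i + L)) = y)]
    · simp only [PySem.List.mem_pyRange_one]
    · intro s i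
      rw [PySem.Set.mem_add]
      exact or_congr Iff.rfl eq_comm

-- Core: for a name whose length is one of the collected lengths (all of which
-- are string lengths, hence nonnegative), membership in B's window set is
-- exactly Python's `name in text`.
theorem pv_window_contains_eq_isIn (text : String) (lengths : PySem.Set Int) (k : String)
    (h0 : ∀ L ∈ lengths, 0 ≤ L) (hk : PySem.Str.len k ∈ lengths) :
    (pvWindowSubs text lengths).contains k = PySem.Str.isIn k text := by
  have hn0 : (0:Int) ≤ PySem.Str.len text := by rw [PySem.Str.len_eq]; positivity
  cases hb : PySem.Str.isIn k text with
  | true =>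
    rw [PySem.Set.contains_iff, pv_mem_window]
    simp only [PySem.Str.isIn] at hb
    refine ⟨PySem.Str.len k, hk, ?_⟩
    rcases hkl : k.toList with _ | ⟨c, cs⟩
    · -- empty name: the window of length 0 at position 0
      have hlen0 : PySem.Str.len k = 0 := by rw [PySem.Str.len_eq, hkl]; rfl
      refine ⟨0, ⟨le_refl _, by omega⟩, ?_⟩
      rw [hlen0]
      have : PySem.Str.slice text (some 0) (some (0 + 0))
          = String.ofList ((text.toList.drop 0).take 0) := by
        simp only [PySem.Str.slice, PySem.Chars.slice]
        rw [show ((0:Int) + 0) = ((0:Nat):Int) by norm_num,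
          show ((0:Int)) = ((0:Nat):Int) by norm_num, PySem.List.slice_natCast]
      rw [this]
      simp only [List.take_zero]
      rw [← String.ofList_toList (s := k), hkl]
    · obtain ⟨j0, hpref⟩ := (PySem.Chars.exists_prefix_drop_iff_isIn k.toList text.toList).mpr hb
      have hm : 0 < k.toList.length := by rw [hkl]; simp
      have hlen : k.toList.length ≤ text.toList.length - j0 := by
        have := hpref.length_le
        simpa using this
      have hj0 : j0 + k.toList.length ≤ text.toList.length := by omega
      have hkL : PySem.Str.len k = (k.toList.length : Int) := PySem.Str.len_eq k
      refine ⟨(j0 : Int), ⟨by omega, ?_⟩, ?_⟩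
      · rw [PySem.Str.len_eq, hkL]
        omega
      · have : PySem.Str.slice text (some (j0 : Int)) (some ((j0:Int) + (k.toList.length : Int)))
            = String.ofList ((text.toList.drop j0).take k.toList.length) := by
          simp only [PySem.Str.slice, PySem.Chars.slice, PySem.List.slice_natCast_add]
        rw [hkL, this, ← List.prefix_iff_eq_take.mp hpref, String.ofList_toList]
  | false =>
    cases hc : (pvWindowSubs text lengths).contains k with
    | false => rfl
    | true =>
      exfalso
      have hmem := (PySem.Set.contains_iff _ _).mp hc
      rw [pv_mem_window] at hmem
      simp only [PySem.Str.isIn] at hb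
      rcases hmem with ⟨L, hL, i, ⟨hi0, hin⟩, hslice⟩
      have hL0 : 0 ≤ L := h0 L hL
      have hi' : i = ((i.toNat : Nat) : Int) := (Int.toNat_of_nonneg hi0).symm
      have hiL : i + L = (((i.toNat + L.toNat) : Nat) : Int) := by push_cast; omega
      rw [hiL, hi'] at hslice
      have hk' : k.toList = (text.toList.drop i.toNat).take (i.toNat + L.toNat - i.toNat) := by
        rw [← hslice]
        simp only [PySem.Str.slice, PySem.Chars.slice, PySem.List.slice_natCast,
          String.toList_ofList, Int.toNat_natCast]
      have hpref : k.toList <+: text.toList.drop i.toNat := by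
        rw [hk']; exact List.take_prefix _ _
      have := (PySem.Chars.exists_prefix_drop_iff_isIn k.toList text.toList).mp ⟨i.toNat, hpref⟩
      rw [this] at hb
      simp at hb

-- Every collected length is nonnegative.
theorem pv_lengths_nonneg (master : PySem.Dict String (List (String × String)))
    (cats : List String) : ∀ L ∈ pvNameLengths master cats, 0 ≤ L := by
  intro L hL
  rcases (pv_mem_lengths master cats L).mp hL with ⟨c, _, p, _, rfl⟩
  rw [PySem.Str.len_eq]
  positivity

-- B's per-category filter computes A's per-category filter.
theorem pv_pvBFilter_eq (text : String) (subs : PySem.Set String)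
    (l : List (String × String))
    (h : ∀ p ∈ l, subs.contains p.1 = PySem.Str.isIn p.1 text) :
    pvBFilter subs l = l.foldl (fun d p =>
      if PySem.Str.isIn p.1 text then d.insert p.1 p.2 else d) (PySem.Dict.mk []) := by
  unfold pvBFilter
  exact PySem.List.foldl_congr_mem l _ _ _ (fun acc p hp => by rw [h p hp])

-- ===== VERDICT (by name: the statement is the Claim_ definition above) =====
theorem get_relevant_glossary_spec : Claim_equal_get_relevant_glossary := by
  intro text mg _hdom
  unfold Spec_get_relevant_glossary
  have hmem : ∀ c ∈ (["characters", "places", "items", "skills"] : List String),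
      ∀ p ∈ (PySem.Dict.mk mg).getD c [],
      PySem.Str.len p.1 ∈ pvNameLengths (PySem.Dict.mk mg) ["characters", "places", "items", "skills"] := by
    intro c hc p hp
    exact (pv_mem_lengths _ _ _).mpr ⟨c, hc, p, hp, rfl⟩
  have hfil : ∀ c ∈ (["characters", "places", "items", "skills"] : List String),
      pvBFilter (pvWindowSubs text (pvNameLengths (PySem.Dict.mk mg) ["characters", "places", "items", "skills"])) ((PySem.Dict.mk mg).getD c [])
      = ((PySem.Dict.mk mg).getD c []).foldl (fun d p => if PySem.Str.isIn p.1 text then d.insert p.1 p.2 else d) (PySem.Dict.mk []) := by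
    intro c hc
    apply pv_pvBFilter_eq
    intro p hp
    exact pv_window_contains_eq_isIn text _ p.1 (pv_lengths_nonneg _ _) (hmem c hc p hp)
  simp only [get_relevant_glossary, get_relevant_glossary_alt, List.foldl_cons, List.foldl_nil]
  rw [hfil "characters" (by simp), hfil "places" (by simp), hfil "items" (by simp),
    hfil "skills" (by simp)]
  rw [pv_stepA text _ "characters" _ (by simp [PySem.Dict.insert, PySem.Dict.contains, PySem.Dict.get?, PySem.Dict.getD])]
  rw [pv_stepA text _ "places" _ (by simp [PySem.Dict.insert, PySem.Dict.contains, PySem.Dict.get?, PySem.Dict.getD])]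
  rw [pv_stepA text _ "items" _ (by simp [PySem.Dict.insert, PySem.Dict.contains, PySem.Dict.get?, PySem.Dict.getD])]
  rw [pv_stepA text _ "skills" _ (by simp [PySem.Dict.insert, PySem.Dict.contains, PySem.Dict.get?, PySem.Dict.getD])]
  simp [PySem.Dict.insert, PySem.Dict.contains, PySem.Dict.get?, PySem.Dict.getD]
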